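-- pv_equiv track=rewrite | github.com/ttager16/Turing | artifacts/audit/stage2/traces/sample_43/oracle/candidate_solution.py | _select_refuel_hub
-- ===== SOURCE A (Python) =====
-- from typing import Dict, List, Union
--
-- def _select_refuel_hub(hub_connectivity: Dict, restricted_zones: List[str]) -> Union[str, None]:
--     """Select optimal refueling hub outside restricted zones."""
--     available_hubs = [
--         hub for hub in hub_connectivity.keys()
--         if hub not in restricted_zones
--     ]
--
--     if not available_hubs:
--         return None
--
--     # Select hub with most connections, ties broken alphabetically by hub name
--     # Use min with negated connection count for O(N) linear scan
--     best_hub = min(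
--         available_hubs,
--         key=lambda h: (-len(hub_connectivity.get(h, [])), h)
--     )
--
--     return best_hub
-- ===== SOURCE B (Python) =====
-- def _select_refuel_hub(hub_connectivity, restricted_zones):
--     """Select optimal refueling hub outside restricted zones (bucket-by-count)."""
--     restricted = set(restricted_zones)
--     # Group the available hubs into buckets indexed by their connection count.
--     buckets = {}
--     for hub, connections in hub_connectivity.items():
--         if hub not in restricted:
--             buckets.setdefault(len(connections), []).append(hub)
--     if not buckets:
--         return None
--     # Best count is the largest bucket key; alphabetical tiebreak = min of that bucket.
--     return min(buckets[max(buckets)])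
-- ===== Notes on version B (the rewrite author's own statement) =====
-- stated objective: faster
-- what changed: Replaces the keyed lexicographic min-scan over (-count, name) by a bucketing strategy: one pass groups the available hubs into a dict indexed by connection count and the answer is the alphabetically smallest hub in the bucket of the maximal count; restricted zones are pre-collected into a set, so the per-hub membership test is O(1) instead of a scan of the restricted list.
import Mathlib
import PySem

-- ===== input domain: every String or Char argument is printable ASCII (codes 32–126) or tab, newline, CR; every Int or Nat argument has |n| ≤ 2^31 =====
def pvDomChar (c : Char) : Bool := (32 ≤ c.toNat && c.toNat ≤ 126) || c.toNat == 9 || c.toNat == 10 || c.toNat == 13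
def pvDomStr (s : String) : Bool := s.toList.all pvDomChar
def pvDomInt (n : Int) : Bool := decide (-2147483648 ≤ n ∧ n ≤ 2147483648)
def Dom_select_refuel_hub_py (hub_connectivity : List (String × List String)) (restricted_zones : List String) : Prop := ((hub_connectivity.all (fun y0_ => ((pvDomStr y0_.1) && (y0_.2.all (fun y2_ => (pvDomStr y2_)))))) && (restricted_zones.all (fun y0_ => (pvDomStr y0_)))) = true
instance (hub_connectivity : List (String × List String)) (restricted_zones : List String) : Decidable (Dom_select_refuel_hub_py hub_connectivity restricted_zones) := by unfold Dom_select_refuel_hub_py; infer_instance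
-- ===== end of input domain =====

-- B replaces A's keyed lexicographic min-scan by a bucketing strategy (group available hubs by connection count in a dict, then min name in the max-count bucket); alternative algorithm, same results.


-- ===== PORT A =====
-- available = [hub for hub in d.keys() if hub not in restricted_zones]; if empty → None;
-- else min(available, key=lambda h: (-len(d.get(h, [])), h))  (tuple key → min2?)
def select_refuel_hub_py (hub_connectivity : List (String × List String)) (restricted_zones : List String) : Option String :=
  let d := PySem.Dict.mk hub_connectivity
  let available := d.keys.filter (fun hub => !restricted_zones.contains hub)
  if available = [] then none
  else PySem.List.min2? available
    (fun h => -((d.getD h []).length : Int)) (fun h => h)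

-- ===== PORT B =====
-- restricted = set(restricted_zones); buckets = {}; for hub, connections in d.items():
--   if hub not in restricted: buckets.setdefault(len(connections), []).append(hub)   (→ Dict.modify)
-- if not buckets: None; else min(buckets[max(buckets)])
def select_refuel_hub_py_alt (hub_connectivity : List (String × List String)) (restricted_zones : List String) : Option String :=
  let d := PySem.Dict.mk hub_connectivity
  let restricted := PySem.Set.ofList restricted_zones
  let buckets := d.items.foldl
    (fun b p =>
      if !(restricted.contains p.1) then b.modify ((p.2.length : Int)) [] (fun l => l ++ [p.1]) else b)
    PySem.Dict.empty
  if buckets.items = [] then none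
  else
    match PySem.List.max? buckets.keys (fun k => k) with
    | none => none
    | some m => PySem.List.min? (buckets.getD m []) (fun h => h)

-- ===== PRECONDITION & SPEC =====
-- Pre_ requires pairwise-distinct hub names: the first argument models a Python dict,
-- which cannot contain duplicate keys, so duplicate-key association lists represent no
-- Python input at all (A is never called on them).
def Pre_select_refuel_hub_py (hub_connectivity : List (String × List String)) (restricted_zones : List String) : Prop :=
  (hub_connectivity.map (fun p => p.1)).Nodup
instance (hub_connectivity : List (String × List String)) (restricted_zones : List String) : Decidable (Pre_select_refuel_hub_py hub_connectivity restricted_zones) := by unfold Pre_select_refuel_hub_py; infer_instance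
def pvWitness_select_refuel_hub_py : (List (String × List String)) × List String :=
  ([("alpha", ["beta", "gamma"]), ("beta", ["alpha"]), ("gamma", [])], ["beta"])

def Spec_select_refuel_hub_py (hub_connectivity : List (String × List String)) (restricted_zones : List String) (out : Option String) : Prop := out = select_refuel_hub_py_alt hub_connectivity restricted_zones
instance (hub_connectivity : List (String × List String)) (restricted_zones : List String) (out : Option String) : Decidable (Spec_select_refuel_hub_py hub_connectivity restricted_zones out) := by unfold Spec_select_refuel_hub_py; infer_instance

-- ===== CLAIM (what is proved, stated in full; the proofs are below) =====
def Claim_equal_select_refuel_hub_py : Prop := ∀ (hub_connectivity : List (String × List String)) (restricted_zones : List String), Dom_select_refuel_hub_py hub_connectivity restricted_zones → Pre_select_refuel_hub_py hub_connectivity restricted_zones → Spec_select_refuel_hub_py hub_connectivity restricted_zones (select_refuel_hub_py hub_connectivity restricted_zones)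

-- ===== LEMMAS AND PROOFS =====

-- Python's tuple order (k1 y, y) < (k1 m, m), lexicographically.
def LexLt (k1 : String → Int) (y m : String) : Prop := k1 y < k1 m ∨ (k1 y = k1 m ∧ y < m)

theorem lexLt_trans (k1 : String → Int) (a b c : String)
    (h1 : LexLt k1 a b) (h2 : LexLt k1 b c) : LexLt k1 a c := by
  rcases h1 with h1 | ⟨h1, h1'⟩ <;> rcases h2 with h2 | ⟨h2, h2'⟩
  · exact Or.inl (lt_trans h1 h2)
  · exact Or.inl (h2 ▸ h1)
  · exact Or.inl (h1 ▸ h2)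
  · exact Or.inr ⟨h1.trans h2, lt_trans h1' h2'⟩

theorem lexLe_trans (k1 : String → Int) (a b c : String)
    (h1 : ¬ LexLt k1 b a) (h2 : ¬ LexLt k1 c b) : ¬ LexLt k1 c a := by
  intro hca
  unfold LexLt at *
  push_neg at h1 h2
  have hba : k1 a ≤ k1 b := h1.1
  have hcb : k1 b ≤ k1 c := h2.1
  rcases hca with h | ⟨he, hs⟩
  · omega
  · have h1' := h1.2 (by omega)
    have h2' := h2.2 (by omega)
    have hab : a ≤ b := not_lt.mp h1'
    have hbc : b ≤ c := not_lt.mp h2'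
    exact absurd hs (not_lt.mpr (hab.trans hbc))

-- the running first-lex-minimum loop, with an accumulator: it returns a lex-minimum of all seen elements
theorem min2?_aux (k1 : String → Int) (xs : List String) : ∀ (a : String),
    ∃ m, xs.foldl
        (fun acc x =>
          match acc with
          | none => some x
          | some mm =>
            if (decide (k1 x < k1 mm) || (!decide (k1 mm < k1 x) && decide (x < mm))) = true
            then some x else some mm)
        (some a) = some m ∧ (m = a ∨ m ∈ xs) ∧
      (∀ y, (y = a ∨ y ∈ xs) → ¬ LexLt k1 y m) := by
  induction xs with
  | nil =>
    intro a
    refine ⟨a, rfl, Or.inl rfl, ?_⟩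
    rintro y (rfl | hy)
    · rintro (h | ⟨_, h⟩)
      · exact lt_irrefl _ h
      · exact lt_irrefl _ h
    · cases hy
  | cons x xs ih =>
    intro a
    by_cases hc : (decide (k1 x < k1 a) || (!decide (k1 a < k1 x) && decide (x < a))) = true
    · -- x beats a: x strictly lex-below a
      have hxa : LexLt k1 x a := by
        have hc' : k1 x < k1 a ∨ (¬ k1 a < k1 x ∧ x < a) := by simpa using hc
        rcases hc' with h | ⟨h1', h2'⟩
        · exact Or.inl h
        · rcases lt_or_ge (k1 x) (k1 a) with hlt | hge
          · exact Or.inl hlt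
          · exact Or.inr ⟨le_antisymm (not_lt.mp h1') hge, h2'⟩
      obtain ⟨m, hm, hmem, hmin⟩ := ih x
      refine ⟨m, ?_, ?_, ?_⟩
      · simp only [List.foldl_cons]
        rw [if_pos hc]
        exact hm
      · rcases hmem with rfl | h
        · exact Or.inr List.mem_cons_self
        · exact Or.inr (List.mem_cons_of_mem _ h)
      · rintro y (rfl | hy)
        · intro hym
          exact hmin x (Or.inl rfl) (lexLt_trans k1 x y m hxa hym)
        · rcases List.mem_cons.mp hy with rfl | hmem2
          · exact hmin y (Or.inl rfl)
          · exact hmin y (Or.inr hmem2)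
    · -- a stays: ¬ x <lex a
      have hxa : ¬ LexLt k1 x a := by
        intro h
        apply hc
        rcases h with h | ⟨he, hs⟩
        · simp [decide_eq_true h]
        · simp [he, hs]
      obtain ⟨m, hm, hmem, hmin⟩ := ih a
      refine ⟨m, ?_, ?_, ?_⟩
      · simp only [List.foldl_cons]
        rw [if_neg hc]
        exact hm
      · rcases hmem with rfl | h
        · exact Or.inl rfl
        · exact Or.inr (List.mem_cons_of_mem _ h)
      · rintro y (rfl | hy)
        · exact hmin y (Or.inl rfl)
        · rcases List.mem_cons.mp hy with rfl | hmem2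
          · exact lexLe_trans k1 m a y (hmin a (Or.inl rfl)) hxa
          · exact hmin y (Or.inr hmem2)

-- one unfolding step of min2? (second key = identity): pop the head into the accumulator
theorem min2?_cons_eq (k1 : String → Int) (x : String) (xs : List String) :
    PySem.List.min2? (x :: xs) k1 (fun h => h) =
      xs.foldl
        (fun acc x =>
          match acc with
          | none => some x
          | some mm =>
            if (decide (k1 x < k1 mm) || (!decide (k1 mm < k1 x) && decide (x < mm))) = true
            then some x else some mm)
        (some x) := by
  unfold PySem.List.min2?
  rw [List.foldl_cons]
  congr 1
  funext acc y
  cases acc <;> rfl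

-- characterisation of min2? with second key = identity, on a nonempty list
theorem min2?_char (k1 : String → Int) (xs : List String) (hne : xs ≠ []) :
    ∃ m, PySem.List.min2? xs k1 (fun h => h) = some m ∧ m ∈ xs ∧
      ∀ y ∈ xs, ¬ LexLt k1 y m := by
  cases xs with
  | nil => exact absurd rfl hne
  | cons x xs =>
    obtain ⟨m, hm, hmem, hmin⟩ := min2?_aux k1 xs x
    refine ⟨m, ?_, ?_, ?_⟩
    · rw [min2?_cons_eq]; exact hm
    · rcases hmem with rfl | h
      · exact List.mem_cons_self ..
      · exact List.mem_cons_of_mem _ h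
    · intro y hy
      rcases List.mem_cons.mp hy with rfl | h
      · exact hmin y (Or.inl rfl)
      · exact hmin y (Or.inr h)

-- membership test through set(restricted_zones) agrees with the raw list's
theorem contains_ofList (rz : List String) (x : String) :
    (PySem.Set.ofList rz).contains x = rz.contains x := by
  simp [List.contains_eq_mem, PySem.Set.mem_ofList]

theorem ofList_ne_nil {α : Type} [BEq α] [LawfulBEq α] (l : List α) (h : l ≠ []) :
    PySem.Set.ofList l ≠ [] := by
  cases l with
  | nil => exact absurd rfl h
  | cons x t =>
    intro hnil
    have : x ∈ PySem.Set.ofList (x :: t) := (PySem.Set.mem_ofList _ _).mpr List.mem_cons_self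
    simp [hnil] at this

-- filter of a mapped list = map of the filtered list
theorem filter_map_comm {α β : Type} (f : α → β) (p : β → Bool) (l : List α) :
    (l.map f).filter p = (l.filter (fun x => p (f x))).map f := by
  induction l with
  | nil => rfl
  | cons x t ih => by_cases h : p (f x) <;> simp [h, ih]

-- bucket lookup after the grouping loop, keyed through `key` with stored value `val`
theorem getD_foldl_modify_key {κ : Type} [BEq κ] [LawfulBEq κ] {α β : Type}
    (key : α → κ) (val : α → β) (l : List α) (d : PySem.Dict κ (List β)) (M : κ) :
    (l.foldl (fun d x => d.modify (key x) [] (fun ll => ll ++ [val x])) d).getD M [] =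
      d.getD M [] ++ (l.filter (fun x => key x == M)).map val := by
  have h := PySem.Dict.getD_foldl_modify_append (l.map (fun x => (key x, val x))) d M
  rw [List.foldl_map, filter_map_comm, List.map_map] at h
  exact h

-- the whole dict-of-buckets phase of B, evaluated: max key then that bucket
theorem grouped_match_eq (key : (String × List String) → Int) (F : List (String × List String)) :
    (if (F.foldl (fun b p => b.modify (key p) [] (fun l => l ++ [p.1])) (PySem.Dict.empty : PySem.Dict Int (List String))).items = [] then none
     else match PySem.List.max? (F.foldl (fun b p => b.modify (key p) [] (fun l => l ++ [p.1])) (PySem.Dict.empty : PySem.Dict Int (List String))).keys (fun k => k) with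
       | none => none
       | some m => PySem.List.min? ((F.foldl (fun b p => b.modify (key p) [] (fun l => l ++ [p.1])) (PySem.Dict.empty : PySem.Dict Int (List String))).getD m []) (fun h => h)) =
    (match PySem.List.max? (PySem.Set.ofList (F.map key)) (fun k => k) with
       | none => none
       | some M => PySem.List.min? ((F.filter (fun q => key q == M)).map (fun q => q.1)) (fun h => h)) := by
  have hkeys : (F.foldl (fun b p => b.modify (key p) [] (fun l => l ++ [p.1])) (PySem.Dict.empty : PySem.Dict Int (List String))).keys = PySem.Set.ofList (F.map key) :=
    PySem.Dict.keys_foldl_modify_key F key [] (fun d x => (fun l => l ++ [x.1])) PySem.Dict.empty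
  by_cases hF : F = []
  · rw [hF]; rfl
  · have hne' : (F.foldl (fun b p => b.modify (key p) [] (fun l => l ++ [p.1])) (PySem.Dict.empty : PySem.Dict Int (List String))).items ≠ [] := by
      intro h
      have hk : (F.foldl (fun b p => b.modify (key p) [] (fun l => l ++ [p.1])) (PySem.Dict.empty : PySem.Dict Int (List String))).keys = [] := by
        show ((F.foldl (fun b p => b.modify (key p) [] (fun l => l ++ [p.1])) (PySem.Dict.empty : PySem.Dict Int (List String))).items.map (fun p => p.1)) = []
        rw [h]
        rfl
      rw [hkeys] at hk
      exact ofList_ne_nil _ (by simp [hF]) hk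
    rw [if_neg hne', hkeys]
    cases hmax : PySem.List.max? (PySem.Set.ofList (F.map key)) (fun k => k) with
    | none => rfl
    | some M =>
      show PySem.List.min? ((F.foldl (fun b p => b.modify (key p) [] (fun l => l ++ [p.1])) (PySem.Dict.empty : PySem.Dict Int (List String))).getD M []) (fun h => h) = _
      rw [show (F.foldl (fun b p => b.modify (key p) [] (fun l => l ++ [p.1])) (PySem.Dict.empty : PySem.Dict Int (List String))).getD M [] = (F.filter (fun q => key q == M)).map (fun q => q.1) from by
        have hg := getD_foldl_modify_key key (fun p => p.1) F PySem.Dict.empty M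
        simpa using hg]

-- B's zeta-reduced canonical form
theorem alt_eq_canon (hc : List (String × List String)) (rz : List String)
    (hpre : (hc.map (fun p => p.1)).Nodup) :
    select_refuel_hub_py_alt hc rz =
      (match PySem.List.max? (PySem.Set.ofList ((hc.filter (fun q => !rz.contains q.1)).map (fun q => (((PySem.Dict.mk hc).getD q.1 []).length : Int)))) (fun k => k) with
       | none => none
       | some M => PySem.List.min? (((hc.filter (fun q => !rz.contains q.1)).filter (fun q => (((PySem.Dict.mk hc).getD q.1 []).length : Int) == M)).map (fun q => q.1)) (fun h => h)) := by
  have hnd : (PySem.Dict.mk hc).keys.Nodup := hpre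
  have hcong : ∀ (acc : PySem.Dict Int (List String)), ∀ x ∈ hc.filter (fun p => !rz.contains p.1),
      acc.modify ((x.2.length : Int)) [] (fun l => l ++ [x.1]) =
      acc.modify ((((PySem.Dict.mk hc).getD x.1 []).length : Int)) [] (fun l => l ++ [x.1]) := by
    intro acc x hx
    have hx' : (x.1, x.2) ∈ (PySem.Dict.mk hc).items := by simpa using List.mem_of_mem_filter hx
    rw [PySem.Dict.getD_of_mem_items (PySem.Dict.mk hc) hx' hnd []]
  unfold select_refuel_hub_py_alt
  simp only [contains_ofList]
  simp only [PySem.List.foldl_if_eq_foldl_filter]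
  rw [PySem.List.foldl_congr_mem _ _ _ _ hcong]
  exact grouped_match_eq (fun p => (((PySem.Dict.mk hc).getD p.1 []).length : Int)) (hc.filter (fun p => !rz.contains p.1))

-- the heart: the alphabetically-least hub of the max-count bucket is the first lexicographic minimum
theorem bucket_min_eq (c : String → Int) (avail : List String) (hne : avail ≠ []) (M : Int)
    (hmax : PySem.List.max? (PySem.Set.ofList (avail.map c)) (fun k => k) = some M) :
    PySem.List.min? (avail.filter (fun h => c h == M)) (fun h => h) =
      PySem.List.min2? avail (fun h => -(c h)) (fun h => h) := by
  obtain ⟨mA, hA, hAmem, hAmin⟩ := min2?_char (fun h => -(c h)) avail hne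
  rw [hA]
  have hM1 : M ∈ avail.map c := (PySem.Set.mem_ofList _ _).mp (PySem.List.max?_mem hmax)
  have hM2 : ∀ y ∈ avail.map c, y ≤ M := fun y hy => PySem.List.max?_isMax hmax y ((PySem.Set.mem_ofList _ _).mpr hy)
  obtain ⟨h0, h0mem, h0c⟩ := List.mem_map.mp hM1
  have hle : c mA ≤ M := hM2 _ (List.mem_map.mpr ⟨mA, hAmem, rfl⟩)
  have hnot := hAmin h0 h0mem
  unfold LexLt at hnot
  push_neg at hnot
  have hge : M ≤ c mA := by have h1 := hnot.1; omega
  have hMA : c mA = M := le_antisymm hle hge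
  have hmAb : mA ∈ avail.filter (fun h => c h == M) := List.mem_filter.mpr ⟨hAmem, by simp [hMA]⟩
  cases hmin : PySem.List.min? (avail.filter (fun h => c h == M)) (fun h => h) with
  | none =>
    rw [(PySem.List.min?_eq_none_iff _ _).mp hmin] at hmAb
    cases hmAb
  | some mB =>
    have hBmem := PySem.List.min?_mem hmin
    obtain ⟨hBav, hBc⟩ := List.mem_filter.mp hBmem
    have hBcM : c mB = M := by simpa using hBc
    have hble : mB ≤ mA := PySem.List.min?_isMin hmin mA hmAb
    have hnot2 := hAmin mB hBav
    unfold LexLt at hnot2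
    push_neg at hnot2
    have halb : mA ≤ mB := hnot2.2 (by omega)
    exact congrArg some (le_antisymm hble halb)

-- ===== VERDICT (by name: the statement is the Claim_ definition above) =====
theorem select_refuel_hub_py_spec : Claim_equal_select_refuel_hub_py := by
  intro hc rz _ hpre
  show select_refuel_hub_py hc rz = select_refuel_hub_py_alt hc rz
  rw [alt_eq_canon hc rz hpre]
  show (if (hc.map (fun p => p.1)).filter (fun hub => !rz.contains hub) = [] then none
        else PySem.List.min2? ((hc.map (fun p => p.1)).filter (fun hub => !rz.contains hub))
          (fun h => -(((PySem.Dict.mk hc).getD h []).length : Int)) (fun h => h)) = _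
  simp only [filter_map_comm (fun p : String × List String => p.1) (fun hub => !rz.contains hub) hc]
  by_cases hF : hc.filter (fun x => !rz.contains x.1) = []
  · rw [hF]; rfl
  · have hA : (hc.filter (fun x => !rz.contains x.1)).map (fun p => p.1) ≠ [] := by simpa using hF
    rw [if_neg hA]
    rw [show (hc.filter (fun x => !rz.contains x.1)).map (fun q => (((PySem.Dict.mk hc).getD q.1 []).length : Int)) = ((hc.filter (fun x => !rz.contains x.1)).map (fun p => p.1)).map (fun h => (((PySem.Dict.mk hc).getD h []).length : Int)) from by rw [List.map_map]; rfl]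
    cases hmax : PySem.List.max? (PySem.Set.ofList (((hc.filter (fun x => !rz.contains x.1)).map (fun p => p.1)).map (fun h => (((PySem.Dict.mk hc).getD h []).length : Int)))) (fun k => k) with
    | none =>
      exact absurd ((PySem.List.max?_eq_none_iff _ _).mp hmax) (ofList_ne_nil _ (by simpa using hF))
    | some M =>
      show _ = PySem.List.min? (((hc.filter (fun q => !rz.contains q.1)).filter (fun q => (((PySem.Dict.mk hc).getD q.1 []).length : Int) == M)).map (fun q => q.1)) (fun h => h)
      rw [show ((hc.filter (fun q => !rz.contains q.1)).filter (fun q => (((PySem.Dict.mk hc).getD q.1 []).length : Int) == M)).map (fun q => q.1) = ((hc.filter (fun x => !rz.contains x.1)).map (fun p => p.1)).filter (fun h => (((PySem.Dict.mk hc).getD h []).length : Int) == M) from (filter_map_comm (fun p : String × List String => p.1) (fun h => (((PySem.Dict.mk hc).getD h []).length : Int) == M) (hc.filter (fun x => !rz.contains x.1))).symm]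
      exact (bucket_min_eq (fun h => (((PySem.Dict.mk hc).getD h []).length : Int)) ((hc.filter (fun x => !rz.contains x.1)).map (fun p => p.1)) hA M hmax).symm
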